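-- pv_equiv track=rewrite | github.com/vema15/mooc2022_problems | part_5/sudoku_add_to_copy.py | copy_and_add
-- ===== SOURCE A (Python) =====
-- def copy_and_add(chubloku: list, row_no: int, column_no: int, number: int):
--     modifiedSudoku = []
--     rowCounter = 0
--     while rowCounter <= len(chubloku)-1:
--         modifiedSudoku.append([])
--         colCounter = 0
--         while colCounter <= len(chubloku[rowCounter])-1:
--             if rowCounter == row_no and colCounter == column_no:
--                 modifiedSudoku[rowCounter].append(number)
--             else:
--                 modifiedSudoku[rowCounter].append(chubloku[rowCounter][colCounter])
--             colCounter += 1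
--         rowCounter+=1
--     return modifiedSudoku
-- ===== SOURCE B (Python) =====
-- def copy_and_add(chubloku: list, row_no: int, column_no: int, number: int):
--     result = []
--     for i, row in enumerate(chubloku):
--         new_row = row[:]
--         if i == row_no and 0 <= column_no < len(row):
--             new_row[column_no] = number
--         result.append(new_row)
--     return result
-- ===== Notes on version B (the rewrite author's own statement) =====
-- stated objective: idiomatic
-- what changed: Replaces A's per-cell while-loops with a conditional append by whole-row slice copies via enumerate plus one targeted in-range-guarded assignment.
import Mathlib
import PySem

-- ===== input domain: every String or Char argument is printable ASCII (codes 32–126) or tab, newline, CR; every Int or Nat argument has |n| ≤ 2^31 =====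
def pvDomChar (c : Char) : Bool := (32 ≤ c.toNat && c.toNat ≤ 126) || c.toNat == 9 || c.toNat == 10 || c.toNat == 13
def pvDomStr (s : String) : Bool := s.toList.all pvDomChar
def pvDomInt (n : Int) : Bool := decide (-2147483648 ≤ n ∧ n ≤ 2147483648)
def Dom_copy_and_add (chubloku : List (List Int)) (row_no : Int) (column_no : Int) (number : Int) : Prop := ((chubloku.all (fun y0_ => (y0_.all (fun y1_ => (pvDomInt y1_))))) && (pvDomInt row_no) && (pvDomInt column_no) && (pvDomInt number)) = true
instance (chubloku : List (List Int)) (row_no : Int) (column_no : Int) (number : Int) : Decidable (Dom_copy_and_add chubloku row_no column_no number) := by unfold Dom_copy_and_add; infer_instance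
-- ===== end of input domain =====

-- B builds the copy row-by-row (enumerate + slice copy) with one guarded assignment instead of A's
-- per-cell conditional while-loops; same behaviour, same cost, more idiomatic.

-- ===== PORT A =====
-- inner while: colCounter from c up to len(row)-1, appending either number or row[c]
def pvAColLoop (row : List Int) (rowCounter : Nat) (row_no column_no number : Int) (c : Nat) :
    List Int :=
  if h : c < row.length then
    (if (rowCounter : Int) = row_no ∧ (c : Int) = column_no then number else row[c]) ::
      pvAColLoop row rowCounter row_no column_no number (c + 1)
  else []
termination_by row.length - c

-- outer while: rowCounter from r up to len(chubloku)-1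
def pvARowLoop (chubloku : List (List Int)) (row_no column_no number : Int) (r : Nat) :
    List (List Int) :=
  if h : r < chubloku.length then
    pvAColLoop chubloku[r] r row_no column_no number 0 ::
      pvARowLoop chubloku row_no column_no number (r + 1)
  else []
termination_by chubloku.length - r

def copy_and_add (chubloku : List (List Int)) (row_no : Int) (column_no : Int) (number : Int) : List (List Int) :=
  pvARowLoop chubloku row_no column_no number 0

-- ===== PORT B =====
def copy_and_add_alt (chubloku : List (List Int)) (row_no : Int) (column_no : Int) (number : Int) : List (List Int) :=
  (PySem.List.enumerate chubloku).map (fun p =>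
    if p.1 = row_no ∧ 0 ≤ column_no ∧ column_no < (p.2.length : Int) then
      p.2.set column_no.toNat number
    else p.2)

-- ===== PRECONDITION & SPEC =====
def Spec_copy_and_add (chubloku : List (List Int)) (row_no : Int) (column_no : Int) (number : Int) (out : List (List Int)) : Prop := out = copy_and_add_alt chubloku row_no column_no number
instance (chubloku : List (List Int)) (row_no : Int) (column_no : Int) (number : Int) (out : List (List Int)) : Decidable (Spec_copy_and_add chubloku row_no column_no number out) := by unfold Spec_copy_and_add; infer_instance

-- ===== CLAIM (what is proved, stated in full; the proofs are below) =====
def Claim_equal_copy_and_add : Prop := ∀ (chubloku : List (List Int)) (row_no : Int) (column_no : Int) (number : Int), Dom_copy_and_add chubloku row_no column_no number → Spec_copy_and_add chubloku row_no column_no number (copy_and_add chubloku row_no column_no number)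

-- ===== LEMMAS AND PROOFS =====

theorem pvAColLoop_length (row : List Int) (rowCounter : Nat) (row_no column_no number : Int)
    (c : Nat) : (pvAColLoop row rowCounter row_no column_no number c).length = row.length - c := by
  rw [pvAColLoop]
  split
  · rw [List.length_cons, pvAColLoop_length row rowCounter row_no column_no number (c+1)]
    omega
  · simp; omega
termination_by row.length - c

theorem pvAColLoop_getElem? (row : List Int) (rowCounter : Nat) (row_no column_no number : Int)
    (c : Nat) (j : Nat) (hcj : c + j < row.length) :
    (pvAColLoop row rowCounter row_no column_no number c)[j]? =
      some (if (rowCounter : Int) = row_no ∧ ((c + j : Nat) : Int) = column_no then number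
      else row[c + j]) := by
  have h : c < row.length := by omega
  cases j with
  | zero => rw [pvAColLoop, dif_pos h]; simp
  | succ j =>
    rw [pvAColLoop, dif_pos h]
    simp only [List.getElem?_cons_succ]
    rw [pvAColLoop_getElem? row rowCounter row_no column_no number (c+1) j (by omega)]
    have : c + 1 + j = c + (j + 1) := by omega
    simp only [this]
termination_by row.length - c

theorem pvARowLoop_length (chubloku : List (List Int)) (row_no column_no number : Int) (r : Nat) :
    (pvARowLoop chubloku row_no column_no number r).length = chubloku.length - r := by
  rw [pvARowLoop]
  split
  · rw [List.length_cons, pvARowLoop_length chubloku row_no column_no number (r+1)]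
    omega
  · simp; omega
termination_by chubloku.length - r

theorem pvARowLoop_getElem? (chubloku : List (List Int)) (row_no column_no number : Int)
    (r : Nat) (j : Nat) (hrj : r + j < chubloku.length) :
    (pvARowLoop chubloku row_no column_no number r)[j]? =
      some (pvAColLoop chubloku[r + j] (r + j) row_no column_no number 0) := by
  have h : r < chubloku.length := by omega
  cases j with
  | zero => rw [pvARowLoop, dif_pos h]; simp
  | succ j =>
    rw [pvARowLoop, dif_pos h]
    simp only [List.getElem?_cons_succ]
    rw [pvARowLoop_getElem? chubloku row_no column_no number (r+1) j (by omega)]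
    have : r + 1 + j = r + (j + 1) := by omega
    simp only [this]
termination_by chubloku.length - r

-- per-row equality: A's inner loop from 0 equals B's per-row transform
theorem pvRow_eq (row : List Int) (i : Nat) (row_no column_no number : Int) :
    pvAColLoop row i row_no column_no number 0 =
      (if (i : Int) = row_no ∧ 0 ≤ column_no ∧ column_no < (row.length : Int) then
        row.set column_no.toNat number
      else row) := by
  apply List.ext_getElem
  · rw [pvAColLoop_length]
    split <;> simp
  · intro j hj hj'
    have hjlen : j < row.length := by rw [pvAColLoop_length] at hj; omega
    have h1 := pvAColLoop_getElem? row i row_no column_no number 0 j (by omega)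
    rw [List.getElem?_eq_getElem hj, Option.some_inj] at h1
    rw [h1]
    simp only [Nat.zero_add]
    by_cases hi : (i : Int) = row_no
    · by_cases hc : 0 ≤ column_no ∧ column_no < (row.length : Int)
      · simp only [hi, hc, and_true, true_and, if_true, List.getElem_set]
        by_cases hjc : (j : Int) = column_no
        · have : column_no.toNat = j := by omega
          simp [hjc, this]
        · have : ¬ column_no.toNat = j := by omega
          simp [hjc, this]
      · have hjc : ¬ (j : Int) = column_no := by omega
        simp [hi, hc, hjc]
    · simp [hi]

theorem copy_and_add_eq (chubloku : List (List Int)) (row_no column_no number : Int) :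
    copy_and_add chubloku row_no column_no number =
      copy_and_add_alt chubloku row_no column_no number := by
  unfold copy_and_add copy_and_add_alt
  apply List.ext_getElem
  · rw [pvARowLoop_length]
    simp [PySem.List.length_enumerate]
  · intro j hj hj'
    have hjlen : j < chubloku.length := by rw [pvARowLoop_length] at hj; omega
    have h1 := pvARowLoop_getElem? chubloku row_no column_no number 0 j (by omega)
    rw [List.getElem?_eq_getElem hj, Option.some_inj] at h1
    rw [h1]
    simp only [Nat.zero_add, List.getElem_map, PySem.List.getElem_enumerate]
    rw [pvRow_eq]
    norm_num

-- ===== VERDICT (by name: the statement is the Claim_ definition above) =====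
theorem copy_and_add_spec : Claim_equal_copy_and_add := by
  intro chubloku row_no column_no number _
  exact copy_and_add_eq chubloku row_no column_no number
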